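-- pv_equiv track=rewrite | github.com/Pepedrm/Practica2TDMD | ejercicio3.py | es_dirigido
-- ===== SOURCE A (Python) =====
-- def es_dirigido(P, R, A):
--     """Verifica si el subconjunto A es dirigido bajo la relación R."""
--     for i in range(len(A)):
--         for j in range(i + 1, len(A)):
--             a, b = A[i], A[j]
--             encontrado_mayor_comun_superior = False
--             for c in P:
--                 if (a, c) in R and (b, c) in R:
--                     encontrado_mayor_comun_superior = True
--                     break
--             if not encontrado_mayor_comun_superior:
--                 return False
--     return True
-- ===== SOURCE B (Python) =====
-- def es_dirigido(P, R, A):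
--     """Verifica si el subconjunto A es dirigido bajo la relación R."""
--     # Index-first rewrite: build the upper-bound set U[x] = {c in P : (x,c) in R}
--     # for each distinct value of A, checking intersections against the already
--     # indexed values as we go; duplicated values additionally need U[x] nonempty.
--     Rset = set(R)
--     seen = set()
--     keys = []   # distinct values of A, first-occurrence order
--     dups = []   # repeated occurrences
--     for x in A:
--         if x in seen:
--             dups.append(x)
--         else:
--             seen.add(x)
--             keys.append(x)
--     U = {}
--     for x in keys:
--         Ux = {c for c in P if (x, c) in Rset}
--         for y, Uy in U.items():
--             if not (Uy & Ux):
--                 return False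
--         U[x] = Ux
--     for x in dups:
--         if not U[x]:
--             return False
--     return True
-- ===== Notes on version B (the rewrite author's own statement) =====
-- stated objective: alternative
-- what changed: B precomputes an upper-bound set U[x] = {c in P : (x,c) in set(R)} for each distinct value of A once, then checks set intersections over distinct-value pairs (plus a non-emptiness check for duplicated values), instead of rescanning R inside a triple nested loop over all index pairs.
import Mathlib
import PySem

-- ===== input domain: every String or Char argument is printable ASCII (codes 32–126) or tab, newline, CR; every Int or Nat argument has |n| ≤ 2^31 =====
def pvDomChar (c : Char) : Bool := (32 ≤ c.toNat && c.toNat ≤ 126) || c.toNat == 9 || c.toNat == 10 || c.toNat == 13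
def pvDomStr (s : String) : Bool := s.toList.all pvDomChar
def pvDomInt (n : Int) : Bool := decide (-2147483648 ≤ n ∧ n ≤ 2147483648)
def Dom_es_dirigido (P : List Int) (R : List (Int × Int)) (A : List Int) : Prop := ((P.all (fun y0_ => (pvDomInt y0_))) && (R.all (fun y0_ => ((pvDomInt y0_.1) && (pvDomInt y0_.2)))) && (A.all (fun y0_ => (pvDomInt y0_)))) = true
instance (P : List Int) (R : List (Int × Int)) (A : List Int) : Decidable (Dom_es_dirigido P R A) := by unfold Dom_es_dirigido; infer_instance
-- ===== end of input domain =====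

-- B replaces A's triple nested scan (rescanning R for every candidate c and every
-- index pair) by a precomputed upper-bound set per distinct value of A, then checks
-- set intersections over distinct-value pairs plus non-emptiness for duplicates.
-- ===== PORT A =====
-- inner 'for c in P: if (a,c) in R and (b,c) in R: found=True; break'
def pvFindC (R : List (Int × Int)) (a b : Int) : List Int → Bool
  | [] => false
  | c :: cs => if R.contains (a, c) && R.contains (b, c) then true else pvFindC R a b cs

-- 'for j in range(i+1, len(A))' over the suffix after A[i]; early 'return False'
def pvInnerA (P : List Int) (R : List (Int × Int)) (a : Int) : List Int → Bool
  | [] => true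
  | b :: bs => if pvFindC R a b P then pvInnerA P R a bs else false

-- 'for i in range(len(A))'
def pvOuterA (P : List Int) (R : List (Int × Int)) : List Int → Bool
  | [] => true
  | a :: rest => if pvInnerA P R a rest then pvOuterA P R rest else false

def es_dirigido (P : List Int) (R : List (Int × Int)) (A : List Int) : Bool :=
  pvOuterA P R A

-- ===== PORT B =====
-- '{c for c in P if (x, c) in Rset}'
def pvUb (P : List Int) (Rset : PySem.Set (Int × Int)) (x : Int) : PySem.Set Int :=
  PySem.Set.ofList (P.filter (fun c => PySem.Set.contains Rset (x, c)))

-- 'for x in A: if x in seen: dups.append(x) else: seen.add(x); keys.append(x)'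
def pvSplit : List Int → PySem.Set Int → List Int → List Int → (List Int × List Int)
  | [], _, keys, dups => (keys, dups)
  | x :: xs, seen, keys, dups =>
    if PySem.Set.contains seen x then pvSplit xs seen keys (dups ++ [x])
    else pvSplit xs (PySem.Set.add seen x) (keys ++ [x]) dups

-- 'for y, Uy in U.items(): if not (Uy & Ux): return False'
def pvCheckDone (Ux : PySem.Set Int) : List (Int × PySem.Set Int) → Bool
  | [] => true
  | (_, Uy) :: ys => if (PySem.Set.inter Uy Ux).isEmpty then false else pvCheckDone Ux ys

-- 'for x in keys: Ux = {…}; scan U.items(); U[x] = Ux'  (early 'return False' = first component)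
def pvPairAcc (P : List Int) (Rset : PySem.Set (Int × Int)) :
    List Int → PySem.Dict Int (PySem.Set Int) → (Bool × PySem.Dict Int (PySem.Set Int))
  | [], U => (true, U)
  | x :: xs, U =>
    let Ux := pvUb P Rset x
    if pvCheckDone Ux U.items then pvPairAcc P Rset xs (U.insert x Ux)
    else (false, U)

-- 'for x in dups: if not U[x]: return False'  (U[x] as getD; every x here is a key of U)
def pvDupsOk (U : PySem.Dict Int (PySem.Set Int)) : List Int → Bool
  | [] => true
  | x :: xs => if (U.getD x []).isEmpty then false else pvDupsOk U xs

def es_dirigido_alt (P : List Int) (R : List (Int × Int)) (A : List Int) : Bool :=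
  let Rset := PySem.Set.ofList R
  let kd := pvSplit A PySem.Set.empty [] []
  let r := pvPairAcc P Rset kd.1 PySem.Dict.empty
  r.1 && pvDupsOk r.2 kd.2

-- ===== PRECONDITION & SPEC =====
def Spec_es_dirigido (P : List Int) (R : List (Int × Int)) (A : List Int) (out : Bool) : Prop := out = es_dirigido_alt P R A
instance (P : List Int) (R : List (Int × Int)) (A : List Int) (out : Bool) : Decidable (Spec_es_dirigido P R A out) := by unfold Spec_es_dirigido; infer_instance

-- ===== CLAIM (what is proved, stated in full; the proofs are below) =====
def Claim_equal_es_dirigido : Prop := ∀ (P : List Int) (R : List (Int × Int)) (A : List Int), Dom_es_dirigido P R A → Spec_es_dirigido P R A (es_dirigido P R A)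


-- ===== LEMMAS AND PROOFS =====

-- 'a and b have a common upper bound in P under R'
def pvG (P : List Int) (R : List (Int × Int)) (a b : Int) : Prop :=
  ∃ c, c ∈ P ∧ (a, c) ∈ R ∧ (b, c) ∈ R

theorem pvG_symm (P : List Int) (R : List (Int × Int)) (a b : Int)
    (h : pvG P R a b) : pvG P R b a := by
  obtain ⟨c, h1, h2, h3⟩ := h; exact ⟨c, h1, h3, h2⟩

theorem pvFindC_iff (P : List Int) (R : List (Int × Int)) (a b : Int) :
    pvFindC R a b P = true ↔ pvG P R a b := by
  induction P with
  | nil => simp [pvFindC, pvG]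
  | cons c cs ih =>
    simp only [pvFindC]
    split_ifs with h
    · simp only [Bool.and_eq_true, List.contains_iff_mem] at h
      simp [pvG]
      exact Or.inl ⟨h.1, h.2⟩
    · simp only [Bool.and_eq_true, List.contains_iff_mem] at h
      rw [ih]
      constructor
      · rintro ⟨d, hd, h2, h3⟩; exact ⟨d, List.mem_cons_of_mem _ hd, h2, h3⟩
      · rintro ⟨d, hd, h2, h3⟩
        rcases List.mem_cons.mp hd with rfl | hd'
        · exact absurd ⟨h2, h3⟩ h
        · exact ⟨d, hd', h2, h3⟩

theorem pvInnerA_iff (P : List Int) (R : List (Int × Int)) (a : Int) (bs : List Int) :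
    pvInnerA P R a bs = true ↔ ∀ b ∈ bs, pvG P R a b := by
  induction bs with
  | nil => simp [pvInnerA]
  | cons b bs ih =>
    simp only [pvInnerA]
    split_ifs with h
    · rw [ih]; rw [pvFindC_iff] at h; simp [h]
    · rw [pvFindC_iff] at h; simp [h]

theorem pvOuterA_iff (P : List Int) (R : List (Int × Int)) (L : List Int) :
    pvOuterA P R L = true ↔ L.Pairwise (pvG P R) := by
  induction L with
  | nil => simp [pvOuterA]
  | cons a l ih =>
    simp only [pvOuterA, List.pairwise_cons]
    split_ifs with h
    · rw [ih]; rw [pvInnerA_iff] at h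
      exact ⟨fun hp => ⟨h, hp⟩, fun hp => hp.2⟩
    · rw [pvInnerA_iff] at h
      simp only [false_iff]
      rintro ⟨h1, _⟩; exact h h1

-- pairwise over a list with duplicates, for a symmetric relation
theorem pairwise_iff_distinct_and_dup {G : Int → Int → Prop}
    (hs : ∀ a b, G a b → G b a) (L : List Int) :
    L.Pairwise G ↔
      (∀ x ∈ L, ∀ y ∈ L, x ≠ y → G x y) ∧ (∀ x, 2 ≤ L.count x → G x x) := by
  induction L with
  | nil => simp
  | cons a l ih =>
    have hcount : ∀ x : Int, List.count x (a :: l) = List.count x l + if x = a then 1 else 0 := by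
      intro x; rw [List.count_cons]
      by_cases hxa : x = a
      · simp [hxa]
      · simp [hxa, Ne.symm hxa]
    rw [List.pairwise_cons, ih]
    constructor
    · rintro ⟨h1, f, g⟩
      refine ⟨?_, ?_⟩
      · intro x hx y hy hxy
        rcases List.mem_cons.mp hx with rfl | hx' <;> rcases List.mem_cons.mp hy with rfl | hy'
        · exact absurd rfl hxy
        · exact h1 _ hy'
        · exact hs _ _ (h1 _ hx')
        · exact f _ hx' _ hy' hxy
      · intro x hx
        rw [hcount] at hx
        by_cases hxa : x = a
        · subst hxa
          rw [if_pos rfl] at hx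
          exact h1 _ (List.count_pos_iff.mp (by omega))
        · exact g x (by simpa [hxa] using hx)
    · rintro ⟨f, g⟩
      refine ⟨?_, ?_, ?_⟩
      · intro b hb
        by_cases hba : b = a
        · subst hba
          have hc := List.count_pos_iff.mpr hb
          refine g b ?_
          rw [hcount, if_pos rfl]; omega
        · exact hs _ _ (f b (List.mem_cons_of_mem _ hb) a List.mem_cons_self hba)
      · intro x hx y hy hxy
        exact f x (List.mem_cons_of_mem _ hx) y (List.mem_cons_of_mem _ hy) hxy
      · intro x hx
        refine g x ?_
        rw [hcount]; split_ifs <;> omega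

theorem pairwise_nodup_iff {G : Int → Int → Prop}
    (hs : ∀ a b, G a b → G b a) (L : List Int) (hn : L.Nodup) :
    L.Pairwise G ↔ ∀ x ∈ L, ∀ y ∈ L, x ≠ y → G x y := by
  rw [pairwise_iff_distinct_and_dup hs]
  constructor
  · exact fun h => h.1
  · intro h
    refine ⟨h, fun x hx => ?_⟩
    have := List.nodup_iff_count_le_one.mp hn x
    omega

-- the keys accumulated by pvSplit: seen and keys run in lockstep
theorem pvSplit_keys (xs : List Int) : ∀ (seen : PySem.Set Int) (dups : List Int),
    (pvSplit xs seen seen dups).1 = PySem.Set.update seen xs := by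
  induction xs with
  | nil => intro seen dups; simp [pvSplit, PySem.Set.update]
  | cons x xs ih =>
    intro seen dups
    rw [PySem.Set.update_cons]
    simp only [pvSplit]
    split_ifs with h
    · rw [PySem.Set.add_of_mem ((PySem.Set.contains_iff _ _).mp h)]
      exact ih seen (dups ++ [x])
    · have hx : x ∉ seen := fun hm => h ((PySem.Set.contains_iff _ _).mpr hm)
      rw [PySem.Set.add_of_not_mem hx] at *
      have := ih (seen ++ [x]) dups
      rw [← PySem.Set.add_of_not_mem hx] at this ⊢
      exact this

theorem pvSplit_dups (xs : List Int) : ∀ (seen : PySem.Set Int) (keys dups : List Int) (x0 : Int),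
    x0 ∈ (pvSplit xs seen keys dups).2 ↔
      x0 ∈ dups ∨ (x0 ∈ seen ∧ x0 ∈ xs) ∨ 2 ≤ xs.count x0 := by
  induction xs with
  | nil => intro seen keys dups x0; simp [pvSplit]
  | cons x xs ih =>
    intro seen keys dups x0
    have hcount : List.count x0 (x :: xs) = List.count x0 xs + if x0 = x then 1 else 0 := by
      rw [List.count_cons]
      by_cases hx0 : x0 = x
      · simp [hx0]
      · simp [hx0, Ne.symm hx0]
    simp only [pvSplit]
    split_ifs with h
    · rw [ih, hcount]
      have hm : x ∈ seen := (PySem.Set.contains_iff _ _).mp h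
      by_cases hx : x0 = x
      · subst hx; simp [List.mem_append, hm]
      · simp [List.mem_append, hx]
    · rw [ih, hcount]
      have hxs : x ∉ seen := fun hm => h ((PySem.Set.contains_iff _ _).mpr hm)
      by_cases hx : x0 = x
      · subst hx
        rw [if_pos rfl]
        constructor
        · rintro (hd | ⟨_, hmem⟩ | hc)
          · exact Or.inl hd
          · have := List.count_pos_iff.mpr hmem; right; right; omega
          · right; right; omega
        · rintro (hd | ⟨hseen, _⟩ | hc)
          · exact Or.inl hd
          · exact absurd hseen hxs
          · right
            by_cases hmem : x0 ∈ xs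
            · exact Or.inl ⟨by simp [PySem.Set.mem_add], hmem⟩
            · have := List.count_eq_zero.mpr hmem; omega
      · simp [PySem.Set.mem_add, hx]



theorem pvDupsOk_iff (U : PySem.Dict Int (PySem.Set Int)) (l : List Int) :
    pvDupsOk U l = true ↔ ∀ x ∈ l, (U.getD x []).isEmpty = false := by
  induction l with
  | nil => simp [pvDupsOk]
  | cons x xs ih =>
    simp only [pvDupsOk]
    split_ifs with h
    · simp only [false_iff]
      intro hall
      have := hall x List.mem_cons_self
      simp [h] at this
    · rw [ih]
      constructor
      · intro hall y hy
        rcases List.mem_cons.mp hy with rfl | hy'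
        · exact Bool.eq_false_iff.mpr h
        · exact hall y hy'
      · intro hall y hy
        exact hall y (List.mem_cons_of_mem _ hy)


theorem pvCheckDone_iff (Ux : PySem.Set Int) (items : List (Int × PySem.Set Int)) :
    pvCheckDone Ux items = true ↔ ∀ p ∈ items, (PySem.Set.inter p.2 Ux).isEmpty = false := by
  induction items with
  | nil => simp [pvCheckDone]
  | cons p ps ih =>
    obtain ⟨y, Uy⟩ := p
    simp only [pvCheckDone]
    split_ifs with h
    · simp only [false_iff]
      intro hall
      have := hall (y, Uy) List.mem_cons_self
      simp [h] at this
    · rw [ih]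
      constructor
      · intro hall q hq
        rcases List.mem_cons.mp hq with rfl | hq'
        · exact Bool.eq_false_iff.mpr h
        · exact hall q hq'
      · intro hall q hq
        exact hall q (List.mem_cons_of_mem _ hq)

theorem pvPairAcc_spec (P : List Int) (Rset : PySem.Set (Int × Int)) (xs : List Int) :
    ∀ (done : List Int) (U : PySem.Dict Int (PySem.Set Int)),
    U.items = done.map (fun y => (y, pvUb P Rset y)) →
    xs.Nodup → (∀ x ∈ xs, x ∉ done) →
    ((pvPairAcc P Rset xs U).1 = true ↔
        (∀ x ∈ xs, ∀ y ∈ done,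
          (PySem.Set.inter (pvUb P Rset y) (pvUb P Rset x)).isEmpty = false) ∧
        xs.Pairwise (fun a b => (PySem.Set.inter (pvUb P Rset a) (pvUb P Rset b)).isEmpty = false))
    ∧ ((pvPairAcc P Rset xs U).1 = true →
        (pvPairAcc P Rset xs U).2.items = (done ++ xs).map (fun y => (y, pvUb P Rset y))) := by
  induction xs with
  | nil => intro done U hI _ _; simp [pvPairAcc, hI]
  | cons x xs ih =>
    intro done U hI hnd hfresh
    have hxdone : x ∉ done := hfresh x List.mem_cons_self
    have hxxs : x ∉ xs := (List.nodup_cons.mp hnd).1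
    simp only [pvPairAcc]
    split_ifs with h
    · -- the scan of U.items() passed: every already-indexed y meets x
      have hdone : ∀ y ∈ done,
          (PySem.Set.inter (pvUb P Rset y) (pvUb P Rset x)).isEmpty = false := by
        intro y hy
        have := (pvCheckDone_iff _ _).mp h (y, pvUb P Rset y)
          (by rw [hI]; exact List.mem_map_of_mem hy)
        exact this
      have hcont : U.contains x = false := by
        rw [PySem.Dict.contains_eq_decide_mem_keys]
        have : U.keys = done := by
          show U.items.map Prod.fst = done
          rw [hI, List.map_map]; simp [Function.comp_def]
        rw [this]; simp [hxdone]
      have hI' : (U.insert x (pvUb P Rset x)).items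
          = (done ++ [x]).map (fun y => (y, pvUb P Rset y)) := by
        rw [PySem.Dict.items_insert_of_not_contains _ _ hcont, hI]; simp
      obtain ⟨ihiff, ihitems⟩ := ih (done ++ [x]) (U.insert x (pvUb P Rset x)) hI'
        (List.nodup_cons.mp hnd).2
        (fun z hz => by
          intro hmem
          rcases List.mem_append.mp hmem with hz' | hz'
          · exact hfresh z (List.mem_cons_of_mem _ hz) hz'
          · exact hxxs (List.mem_singleton.mp hz' ▸ hz))
      constructor
      · rw [ihiff, List.pairwise_cons]
        constructor
        · rintro ⟨f, g⟩
          refine ⟨?_, ?_, g⟩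
          · intro z hz y hy
            rcases List.mem_cons.mp hz with rfl | hz'
            · exact hdone y hy
            · exact f z hz' y (List.mem_append_left _ hy)
          · intro z hz
            exact f z hz x (List.mem_append_right _ (List.mem_singleton.mpr rfl))
        · rintro ⟨f, hx, g⟩
          refine ⟨?_, g⟩
          intro z hz y hy
          rcases List.mem_append.mp hy with hy' | hy'
          · exact f z (List.mem_cons_of_mem _ hz) y hy'
          · exact List.mem_singleton.mp hy' ▸ hx z hz
      · intro hres
        rw [ihitems hres]
        simp
    · -- the scan failed on some already-indexed y: not directed
      constructor
      · simp only [false_iff]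
        rintro ⟨f, _⟩
        apply h
        rw [pvCheckDone_iff, hI]
        rintro p hp
        obtain ⟨y, hy, rfl⟩ := List.mem_map.mp hp
        exact f x List.mem_cons_self y hy
      · intro hres
        exact hres.elim

theorem pvUb_mem (P : List Int) (R : List (Int × Int)) (x c : Int) :
    c ∈ pvUb P (PySem.Set.ofList R) x ↔ c ∈ P ∧ (x, c) ∈ R := by
  unfold pvUb
  rw [PySem.Set.mem_ofList, List.mem_filter]
  simp [PySem.Set.mem_ofList]

theorem set_isEmpty_false_iff (s : List Int) :
    s.isEmpty = false ↔ ∃ c, c ∈ s := by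
  cases s <;> simp

-- ===== VERDICT (by name: the statement is the Claim_ definition above) =====
theorem es_dirigido_spec : Claim_equal_es_dirigido := by
  intro P R A _
  unfold Spec_es_dirigido es_dirigido es_dirigido_alt
  simp only []
  set Rset := PySem.Set.ofList R with hR
  set keys := (pvSplit A PySem.Set.empty [] []).1 with hk
  set dups := (pvSplit A PySem.Set.empty [] []).2 with hd
  set r := pvPairAcc P Rset keys PySem.Dict.empty with hr
  have hkeys : keys = PySem.Set.ofList A := by
    rw [hk]
    have := pvSplit_keys A PySem.Set.empty []
    simpa [PySem.Set.update_empty] using this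
  have hnodup : keys.Nodup := by rw [hkeys]; exact PySem.Set.nodup_ofList A
  have hmemk : ∀ x, x ∈ keys ↔ x ∈ A := by
    intro x; rw [hkeys, PySem.Set.mem_ofList]
  have hmemd : ∀ x, x ∈ dups ↔ 2 ≤ A.count x := by
    intro x
    rw [hd, pvSplit_dups]
    simp [PySem.Set.empty]
  have hrel : ∀ x y,
      ((PySem.Set.inter (pvUb P Rset x) (pvUb P Rset y)).isEmpty = false ↔ pvG P R x y) := by
    intro x y
    rw [set_isEmpty_false_iff]
    constructor
    · rintro ⟨c, hc⟩
      rw [PySem.Set.mem_inter] at hc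
      obtain ⟨h1, h2⟩ := hc
      rw [hR, pvUb_mem] at h1 h2
      exact ⟨c, h1.1, h1.2, h2.2⟩
    · rintro ⟨c, h1, h2, h3⟩
      refine ⟨c, ?_⟩
      rw [PySem.Set.mem_inter, hR, pvUb_mem, pvUb_mem]
      exact ⟨⟨h1, h2⟩, ⟨h1, h3⟩⟩
  obtain ⟨hiff, hitems⟩ := pvPairAcc_spec P Rset keys [] PySem.Dict.empty (by rfl) hnodup
    (by intro x _; exact List.not_mem_nil)
  rw [← hr] at hiff hitems
  simp only [List.not_mem_nil, false_implies, implies_true, true_and] at hiff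
  rw [Bool.eq_iff_iff, pvOuterA_iff, Bool.and_eq_true,
    pairwise_iff_distinct_and_dup (pvG_symm P R) A]
  have hpairs : keys.Pairwise (fun a b => pvG P R a b) ↔
      (∀ x ∈ A, ∀ y ∈ A, x ≠ y → pvG P R x y) := by
    rw [pairwise_nodup_iff (pvG_symm P R) keys hnodup]
    constructor
    · intro hp x hx y hy hxy
      exact hp x ((hmemk x).mpr hx) y ((hmemk y).mpr hy) hxy
    · intro hp x hx y hy hxy
      exact hp x ((hmemk x).mp hx) y ((hmemk y).mp hy) hxy
  have hiff' : r.1 = true ↔ (∀ x ∈ A, ∀ y ∈ A, x ≠ y → pvG P R x y) := by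
    rw [hiff, ← hpairs]
    exact List.Pairwise.iff_of_mem (fun {a b} _ _ => hrel a b)
  constructor
  · rintro ⟨f, g⟩
    have hr1 : r.1 = true := hiff'.mpr f
    refine ⟨hr1, ?_⟩
    rw [pvDupsOk_iff]
    intro x hx
    have hc : 2 ≤ A.count x := (hmemd x).mp hx
    have hxk : x ∈ keys := (hmemk x).mpr (List.count_pos_iff.mp (by omega))
    have hget : r.2.getD x [] = pvUb P Rset x := by
      rw [PySem.Dict.getD_eq_get?_getD, PySem.Dict.get?_of_mem_items r.2
        (by rw [hitems hr1]; exact List.mem_map_of_mem hxk)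
        (by show r.2.items.map Prod.fst |>.Nodup
            rw [hitems hr1, List.map_map]; simpa [Function.comp_def] using hnodup)]
      rfl
    rw [hget, set_isEmpty_false_iff]
    obtain ⟨c, h1, h2, _⟩ := g x hc
    exact ⟨c, by rw [hR, pvUb_mem]; exact ⟨h1, h2⟩⟩
  · rintro ⟨hr1, hdup⟩
    rw [pvDupsOk_iff] at hdup
    refine ⟨hiff'.mp hr1, ?_⟩
    intro x hc
    have hxA : x ∈ A := List.count_pos_iff.mp (by omega)
    have hxk : x ∈ keys := (hmemk x).mpr hxA
    have hget : r.2.getD x [] = pvUb P Rset x := by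
      rw [PySem.Dict.getD_eq_get?_getD, PySem.Dict.get?_of_mem_items r.2
        (by rw [hitems hr1]; exact List.mem_map_of_mem hxk)
        (by show r.2.items.map Prod.fst |>.Nodup
            rw [hitems hr1, List.map_map]; simpa [Function.comp_def] using hnodup)]
      rfl
    have := hdup x ((hmemd x).mpr hc)
    rw [hget, set_isEmpty_false_iff] at this
    obtain ⟨c, hcm⟩ := this
    rw [hR, pvUb_mem] at hcm
    exact ⟨c, hcm.1, hcm.2, hcm.2⟩
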